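-- pv_equiv track=rewrite | github.com/pypi-data/pypi-mirror-401 | packages/bodo/bodo-2026.1-cp314-cp314-macosx_12_0_arm64.whl/bodo/utils/typing.py | handle_bodosql_case_init_code
-- ===== SOURCE A (Python) =====
-- def handle_bodosql_case_init_code(init_code):
--     """Extract variable names in CASE initialization code generated by BodoSQL and check
--     if we can avoid inlining.
--
--     Args:
--         init_code (str): CASE initialization code generated by BodoSQL
--
--     Returns:
--         tuple(list(str), bool): variable names and must_inline flag
--     """
--     # Extract the arrays used in the codegen to verify we can avoid inlining.
--     var_names = []
--     init_lines = init_code.split("\n")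
--     must_inline = False
--     for line in init_lines:
--         parts = line.split("=")
--         # If len parts is 1, then this isn't an assignment
--         # Right now everything is required to be an assignment
--         # except empty whitespace at the BodoSQL level or closures.
--         # We don't yet know how to avoid inlining the IR if we have
--         # closures
--         if len(parts) > 1:
--             var_names.append(parts[0].strip())
--         elif parts[0].strip() != "":
--             must_inline = True
--             break
--
--     return var_names, must_inline
-- ===== SOURCE B (Python) =====
-- def handle_bodosql_case_init_code(init_code):
--     """Two-pass version: first find the boundary (first non-empty line without an
--     assignment), then collect variable names from the prefix before it."""
--     lines = init_code.split("\n")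
--     boundary = len(lines)
--     must_inline = False
--     for i, line in enumerate(lines):
--         if "=" not in line and line.strip() != "":
--             boundary = i
--             must_inline = True
--             break
--     var_names = [line.split("=")[0].strip() for line in lines[:boundary] if "=" in line]
--     return var_names, must_inline
-- ===== Notes on version B (the rewrite author's own statement) =====
-- stated objective: alternative
-- what changed: Replaced A's single fused loop (accumulate names and detect the break line in one pass with mutable state) by a two-pass decomposition: a boundary-finding scan for the first non-empty non-assignment line, then a pure filter/map comprehension over the prefix before that boundary.
import Mathlib
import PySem

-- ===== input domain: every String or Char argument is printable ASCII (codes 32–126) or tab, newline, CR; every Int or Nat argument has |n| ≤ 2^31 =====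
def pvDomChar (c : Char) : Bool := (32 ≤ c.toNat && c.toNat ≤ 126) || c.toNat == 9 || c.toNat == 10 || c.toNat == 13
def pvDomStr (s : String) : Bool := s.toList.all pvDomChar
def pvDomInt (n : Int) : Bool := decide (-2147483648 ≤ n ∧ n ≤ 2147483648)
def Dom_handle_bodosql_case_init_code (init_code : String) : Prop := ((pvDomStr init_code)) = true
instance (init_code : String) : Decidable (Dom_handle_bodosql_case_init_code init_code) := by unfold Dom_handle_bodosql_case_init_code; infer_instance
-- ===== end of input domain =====

-- B replaces A's single fused loop by a boundary-finding scan plus a filter/map pass over the prefix (alternative decomposition, same cost).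

-- ===== PORT A =====
-- A's fused for-loop with break: accumulate names, stop with must_inline on the
-- first non-empty line without '='.
def pvALoop : List (List Char) → List String × Bool
  | [] => ([], false)
  | line :: rest =>
    let parts := PySem.Chars.splitOn line ['=']
    if 1 < parts.length then
      let r := pvALoop rest
      (String.ofList (PySem.Chars.strip (parts.headD [])) :: r.1, r.2)
    else if PySem.Chars.strip (parts.headD []) ≠ [] then ([], true)
    else pvALoop rest

def handle_bodosql_case_init_code (init_code : String) : List String × Bool :=
  pvALoop (PySem.Chars.splitOn init_code.toList ['\n'])

-- ===== PORT B =====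
-- Pass 1: index of the first line with no '=' and non-empty strip (Source B's enumerate loop).
def pvBFind : List (List Char) → Option Nat
  | [] => none
  | line :: rest =>
    if PySem.Chars.isIn ['='] line = false ∧ PySem.Chars.strip line ≠ [] then some 0
    else (pvBFind rest).map (· + 1)

def handle_bodosql_case_init_code_alt (init_code : String) : List String × Bool :=
  let lines := PySem.Chars.splitOn init_code.toList ['\n']
  let found := pvBFind lines
  let boundary := found.getD lines.length
  (((lines.take boundary).filter (fun l => PySem.Chars.isIn ['='] l)).map
      (fun l => String.ofList (PySem.Chars.strip ((PySem.Chars.splitOn l ['=']).headD []))),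
   found.isSome)

-- ===== PRECONDITION & SPEC =====
def Spec_handle_bodosql_case_init_code (init_code : String) (out : List String × Bool) : Prop := out = handle_bodosql_case_init_code_alt init_code
instance (init_code : String) (out : List String × Bool) : Decidable (Spec_handle_bodosql_case_init_code init_code out) := by unfold Spec_handle_bodosql_case_init_code; infer_instance

-- ===== CLAIM (what is proved, stated in full; the proofs are below) =====
def Claim_equal_handle_bodosql_case_init_code : Prop := ∀ (init_code : String), Dom_handle_bodosql_case_init_code init_code → Spec_handle_bodosql_case_init_code init_code (handle_bodosql_case_init_code init_code)

-- ===== LEMMAS AND PROOFS =====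

-- splitOn.go never lands below acc.length + 1 pieces
theorem pv_go_length_ge (sep : List Char) : ∀ (fuel : Nat) (l cur : List Char)
    (acc : List (List Char)),
    acc.length + 1 ≤ (PySem.Chars.splitOn.go sep fuel l cur acc).length := by
  intro fuel
  induction fuel with
  | zero => intro l cur acc; simp [PySem.Chars.splitOn.go]
  | succ n ih =>
    intro l cur acc
    cases l with
    | nil => simp [PySem.Chars.splitOn.go]
    | cons c rest =>
      simp only [PySem.Chars.splitOn.go]
      split
      · calc acc.length + 1 ≤ (List.reverse cur :: acc).length + 1 := by simp
          _ ≤ _ := ih _ _ _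
      · exact ih _ _ _

-- more than acc.length + 1 pieces exactly when the (nonempty) separator occurs
theorem pv_go_length_gt (sep : List Char) (hsep : sep ≠ []) :
    ∀ (fuel : Nat) (l cur : List Char) (acc : List (List Char)), l.length < fuel →
    (acc.length + 1 < (PySem.Chars.splitOn.go sep fuel l cur acc).length ↔ sep <:+: l) := by
  intro fuel
  induction fuel with
  | zero => intro l cur acc h; omega
  | succ n ih =>
    intro l cur acc hf
    cases l with
    | nil =>
      simp only [PySem.Chars.splitOn.go, List.reverse_cons, List.length_append,
        List.length_reverse, List.length_cons, List.length_nil]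
      constructor
      · intro h; omega
      · intro h; exact absurd (List.infix_nil.mp h) hsep
    | cons c rest =>
      simp only [PySem.Chars.splitOn.go]
      split
      · rename_i hpre
        constructor
        · intro _
          exact ((List.isPrefixOf_iff_prefix.mp hpre).isInfix)
        · intro _
          have h1 := pv_go_length_ge sep n (List.drop sep.length (c :: rest)) []
            (List.reverse cur :: acc)
          simp at h1
          omega
      · rename_i hpre
        have hlen : rest.length < n := by simp at hf; omega
        rw [ih rest (c :: cur) acc hlen]
        rw [List.infix_cons_iff]
        constructor
        · intro h; exact Or.inr h
        · rintro (h | h)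
          · exact absurd (List.isPrefixOf_iff_prefix.mpr h) (by simpa using hpre)
          · exact h

-- if the separator does not occur, go returns the single remaining piece
theorem pv_go_no_occur (sep : List Char) : ∀ (fuel : Nat) (l cur : List Char)
    (acc : List (List Char)), l.length < fuel → ¬ sep <:+: l →
    PySem.Chars.splitOn.go sep fuel l cur acc = acc.reverse ++ [cur.reverse ++ l] := by
  intro fuel
  induction fuel with
  | zero => intro l cur acc h; omega
  | succ n ih =>
    intro l cur acc hf hocc
    cases l with
    | nil => simp [PySem.Chars.splitOn.go]
    | cons c rest =>
      simp only [PySem.Chars.splitOn.go]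
      split
      · rename_i hpre
        exact absurd (List.isPrefixOf_iff_prefix.mp hpre).isInfix hocc
      · have hlen : rest.length < n := by simp at hf; omega
        rw [ih rest (c :: cur) acc hlen (fun h => hocc (List.infix_cons_iff.mpr (Or.inr h)))]
        simp

theorem pv_splitOn_length_gt (l sep : List Char) (hsep : sep ≠ []) :
    (1 < (PySem.Chars.splitOn l sep).length ↔ sep <:+: l) := by
  unfold PySem.Chars.splitOn
  have := pv_go_length_gt sep hsep (l.length + 1) l [] [] (by omega)
  simpa using this

theorem pv_splitOn_no_occur (l sep : List Char) (hocc : ¬ sep <:+: l) :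
    PySem.Chars.splitOn l sep = [l] := by
  unfold PySem.Chars.splitOn
  exact pv_go_no_occur sep (l.length + 1) l [] [] (by omega) hocc

theorem pv_getD_map_succ (o : Option Nat) (n : Nat) :
    (o.map (· + 1)).getD (n + 1) = o.getD n + 1 := by cases o <;> rfl

theorem pv_loop_eq (ls : List (List Char)) :
    pvALoop ls =
      ((((ls.take ((pvBFind ls).getD ls.length)).filter
            (fun l => PySem.Chars.isIn ['='] l)).map
          (fun l => String.ofList (PySem.Chars.strip ((PySem.Chars.splitOn l ['=']).headD []))),
        (pvBFind ls).isSome)) := by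
  induction ls with
  | nil => rfl
  | cons line rest ih =>
    by_cases hin : PySem.Chars.isIn ['='] line = true
    · have hinf : ['='] <:+: line := (PySem.Chars.isIn_iff_infix _ _).mp hin
      have hgt : 1 < (PySem.Chars.splitOn line ['=']).length :=
        (pv_splitOn_length_gt line ['='] (by simp)).mpr hinf
      have hfind : pvBFind (line :: rest) = (pvBFind rest).map (· + 1) := by
        simp [pvBFind, hin]
      rw [show pvALoop (line :: rest) =
          (String.ofList (PySem.Chars.strip ((PySem.Chars.splitOn line ['=']).headD []))
              :: (pvALoop rest).1, (pvALoop rest).2) by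
        simp [pvALoop, hgt]]
      rw [ih, hfind]
      simp only [List.length_cons, pv_getD_map_succ, List.take_succ_cons, Option.isSome_map]
      simp [hin]
    · have hnin : PySem.Chars.isIn ['='] line = false := by
        cases h : PySem.Chars.isIn ['='] line
        · rfl
        · exact absurd h hin
      have hninf : ¬ ['='] <:+: line := (PySem.Chars.isIn_eq_false_iff _ _).mp hnin
      have hsp : PySem.Chars.splitOn line ['='] = [line] := pv_splitOn_no_occur line ['='] hninf
      have hngt : ¬ 1 < (PySem.Chars.splitOn line ['=']).length := by simp [hsp]
      by_cases hstrip : PySem.Chars.strip line ≠ []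
      · have hfind : pvBFind (line :: rest) = some 0 := by
          simp [pvBFind, hnin, hstrip]
        rw [show pvALoop (line :: rest) = ([], true) by
          simp [pvALoop, hsp, hstrip]]
        rw [hfind]
        simp
      · have hfind : pvBFind (line :: rest) = (pvBFind rest).map (· + 1) := by
          simp [pvBFind, hstrip]
        rw [show pvALoop (line :: rest) = pvALoop rest by
          simp [pvALoop, hsp]
          intro h
          exact absurd h hstrip]
        rw [ih, hfind]
        simp only [List.length_cons, pv_getD_map_succ, List.take_succ_cons, Option.isSome_map]
        simp [hnin]

-- ===== VERDICT (by name: the statement is the Claim_ definition above) =====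
theorem handle_bodosql_case_init_code_spec : Claim_equal_handle_bodosql_case_init_code := by
  intro init_code _
  unfold Spec_handle_bodosql_case_init_code handle_bodosql_case_init_code
    handle_bodosql_case_init_code_alt
  exact pv_loop_eq _
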